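-- pv_equiv track=rewrite | github.com/111wangyechen/eai-interpretable-interface | subgoal_decomposition/subgoal_decomposer.py | _infer_preconditions
-- ===== SOURCE A (Python) =====
-- from typing import Dict, List, Optional, Tuple, Set, Union
--
-- def _infer_preconditions(action_description: str) -> List[str]:
--     """
--     自动推断动作的前提条件
--
--     Args:
--         action_description: 动作描述
--
--     Returns:
--         List[str]: 推断的前提条件列表
--     """
--     preconditions = []
--
--     # 基于动作名称和模式推断前提条件
--     action_lower = action_description.lower()
--
--     # 移动相关动作
--     if any(keyword in action_lower for keyword in ['move', 'walk', 'go', 'approach', 'navigate']):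
--         preconditions.append('agent_available')
--         preconditions.append('path_clear')
--
--     # 抓取相关动作
--     elif any(keyword in action_lower for keyword in ['pick', 'grab', 'take', 'grasp']):
--         preconditions.append('agent_available')
--         preconditions.append('object_visible')
--         preconditions.append('object_reachable')
--
--     # 放置相关动作
--     elif any(keyword in action_lower for keyword in ['place', 'put', 'drop', 'release']):
--         preconditions.append('agent_available')
--         preconditions.append('object_in_hand')
--         preconditions.append('target_location_clear')
--
--     # 操作相关动作
--     elif any(keyword in action_lower for keyword in ['open', 'close', 'turn', 'activate', 'deactivate']):
--         preconditions.append('agent_available')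
--         preconditions.append('object_visible')
--         preconditions.append('object_reachable')
--
--     # 检查相关动作
--     elif any(keyword in action_lower for keyword in ['check', 'verify', 'inspect', 'monitor']):
--         preconditions.append('agent_available')
--         preconditions.append('object_visible')
--
--     # 通信相关动作
--     elif any(keyword in action_lower for keyword in ['communicate', 'report', 'say', 'tell']):
--         preconditions.append('agent_available')
--         preconditions.append('communication_channel_available')
--
--     # 默认前提条件
--     else:
--         preconditions.append('agent_available')
--
--     return preconditions
-- ===== SOURCE B (Python) =====
-- # B: flat keyword->group-index map; the answer is the preconditions table entry at the
-- # MINIMUM matching group index (min-aggregation instead of a first-match if/elif chain).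
-- _KEYWORD_GROUP = {
--     'move': 0, 'walk': 0, 'go': 0, 'approach': 0, 'navigate': 0,
--     'pick': 1, 'grab': 1, 'take': 1, 'grasp': 1,
--     'place': 2, 'put': 2, 'drop': 2, 'release': 2,
--     'open': 3, 'close': 3, 'turn': 3, 'activate': 3, 'deactivate': 3,
--     'check': 4, 'verify': 4, 'inspect': 4, 'monitor': 4,
--     'communicate': 5, 'report': 5, 'say': 5, 'tell': 5,
-- }
--
-- _PRECONDITIONS = (
--     ('agent_available', 'path_clear'),
--     ('agent_available', 'object_visible', 'object_reachable'),
--     ('agent_available', 'object_in_hand', 'target_location_clear'),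
--     ('agent_available', 'object_visible', 'object_reachable'),
--     ('agent_available', 'object_visible'),
--     ('agent_available', 'communication_channel_available'),
--     ('agent_available',),
-- )
--
--
-- def _infer_preconditions(action_description: str):
--     action_lower = action_description.lower()
--     idx = min((g for kw, g in _KEYWORD_GROUP.items() if kw in action_lower), default=6)
--     return list(_PRECONDITIONS[idx])
-- ===== Notes on version B (the rewrite author's own statement) =====
-- stated objective: alternative
-- what changed: Replaces the unrolled first-match if/elif keyword chain with a flat keyword-to-group-index map whose minimum matching index (min-aggregation, default 6) selects a row of a preconditions table.
import Mathlib
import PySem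

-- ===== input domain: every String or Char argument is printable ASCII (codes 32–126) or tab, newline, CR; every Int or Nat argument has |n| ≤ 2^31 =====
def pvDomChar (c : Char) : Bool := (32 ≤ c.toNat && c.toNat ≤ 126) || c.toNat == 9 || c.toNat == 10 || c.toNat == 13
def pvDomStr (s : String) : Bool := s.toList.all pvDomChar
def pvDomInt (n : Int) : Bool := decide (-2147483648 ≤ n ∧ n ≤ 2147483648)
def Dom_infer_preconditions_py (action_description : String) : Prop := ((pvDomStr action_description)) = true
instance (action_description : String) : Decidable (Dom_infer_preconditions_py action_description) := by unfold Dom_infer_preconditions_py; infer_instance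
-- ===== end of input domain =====

-- B replaces A's first-match if/elif keyword chain by a flat keyword->group-index map aggregated with min into a table lookup (objective: alternative).


-- ===== PORT A =====
def infer_preconditions_py (action_description : String) : List String :=
  let preconditions : List String := []
  let action_lower := PySem.Str.lower action_description
  if ["move", "walk", "go", "approach", "navigate"].any (fun k => PySem.Str.isIn k action_lower) then
    preconditions ++ ["agent_available"] ++ ["path_clear"]
  else if ["pick", "grab", "take", "grasp"].any (fun k => PySem.Str.isIn k action_lower) then
    preconditions ++ ["agent_available"] ++ ["object_visible"] ++ ["object_reachable"]
  else if ["place", "put", "drop", "release"].any (fun k => PySem.Str.isIn k action_lower) then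
    preconditions ++ ["agent_available"] ++ ["object_in_hand"] ++ ["target_location_clear"]
  else if ["open", "close", "turn", "activate", "deactivate"].any (fun k => PySem.Str.isIn k action_lower) then
    preconditions ++ ["agent_available"] ++ ["object_visible"] ++ ["object_reachable"]
  else if ["check", "verify", "inspect", "monitor"].any (fun k => PySem.Str.isIn k action_lower) then
    preconditions ++ ["agent_available"] ++ ["object_visible"]
  else if ["communicate", "report", "say", "tell"].any (fun k => PySem.Str.isIn k action_lower) then
    preconditions ++ ["agent_available"] ++ ["communication_channel_available"]
  else
    preconditions ++ ["agent_available"]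

-- ===== PORT B =====
-- flat keyword -> group-index map (insertion order of B's dict literal)
def pvKeywordGroup : List (String × Nat) :=
  [ ("move", 0), ("walk", 0), ("go", 0), ("approach", 0), ("navigate", 0),
    ("pick", 1), ("grab", 1), ("take", 1), ("grasp", 1),
    ("place", 2), ("put", 2), ("drop", 2), ("release", 2),
    ("open", 3), ("close", 3), ("turn", 3), ("activate", 3), ("deactivate", 3),
    ("check", 4), ("verify", 4), ("inspect", 4), ("monitor", 4),
    ("communicate", 5), ("report", 5), ("say", 5), ("tell", 5) ]

def pvPreconditionsTable : List (List String) :=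
  [ ["agent_available", "path_clear"],
    ["agent_available", "object_visible", "object_reachable"],
    ["agent_available", "object_in_hand", "target_location_clear"],
    ["agent_available", "object_visible", "object_reachable"],
    ["agent_available", "object_visible"],
    ["agent_available", "communication_channel_available"],
    ["agent_available"] ]

def infer_preconditions_py_alt (action_description : String) : List String :=
  let action_lower := PySem.Str.lower action_description
  -- min(..., default=6) ported as a fold of Nat.min starting from 6 over the matching indices
  let idx := (pvKeywordGroup.filterMap
      (fun p => if PySem.Str.isIn p.1 action_lower then some p.2 else none)).foldl Nat.min 6
  pvPreconditionsTable.getD idx ["agent_available"]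

-- ===== PRECONDITION & SPEC =====
def Spec_infer_preconditions_py (action_description : String) (out : List String) : Prop := out = infer_preconditions_py_alt action_description
instance (action_description : String) (out : List String) : Decidable (Spec_infer_preconditions_py action_description out) := by unfold Spec_infer_preconditions_py; infer_instance

-- ===== CLAIM (what is proved, stated in full; the proofs are below) =====
def Claim_equal_infer_preconditions_py : Prop := ∀ (action_description : String), Dom_infer_preconditions_py action_description → Spec_infer_preconditions_py action_description (infer_preconditions_py action_description)

-- ===== LEMMAS AND PROOFS =====

-- In a constant-index segment, folding Nat.min over the matched indices is
-- `Nat.min acc i` iff some keyword of the segment matches, otherwise `acc`.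
theorem pv_foldl_min_seg (ws : List String) (i acc : Nat) (low : String) :
    ((ws.map (fun w => (w, i))).filterMap
        (fun p : String × Nat => if PySem.Str.isIn p.1 low then some p.2 else none)).foldl Nat.min acc
      = if ws.any (fun k => PySem.Str.isIn k low) then Nat.min acc i else acc := by
  induction ws generalizing acc with
  | nil => simp
  | cons w rest ih =>
    simp only [List.map_cons, List.filterMap_cons, List.any_cons]
    by_cases h : PySem.Str.isIn w low
    · simp only [h, if_pos, Bool.true_or, List.foldl_cons, ih]
      split_ifs <;> simp
    · have h' : PySem.Chars.isIn w.toList low.toList = false := by simpa using h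
      simpa [List.filterMap_map, Function.comp_def, h'] using ih acc

-- ===== VERDICT (by name: the statement is the Claim_ definition above) =====
theorem infer_preconditions_py_spec : Claim_equal_infer_preconditions_py := by
  intro s _
  unfold Spec_infer_preconditions_py infer_preconditions_py infer_preconditions_py_alt
  have hkw : pvKeywordGroup =
      (["move", "walk", "go", "approach", "navigate"].map (fun w => (w, 0)))
      ++ (["pick", "grab", "take", "grasp"].map (fun w => (w, 1)))
      ++ (["place", "put", "drop", "release"].map (fun w => (w, 2)))
      ++ (["open", "close", "turn", "activate", "deactivate"].map (fun w => (w, 3)))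
      ++ (["check", "verify", "inspect", "monitor"].map (fun w => (w, 4)))
      ++ (["communicate", "report", "say", "tell"].map (fun w => (w, 5))) := rfl
  rw [hkw]
  simp only [List.filterMap_append, List.foldl_append, pv_foldl_min_seg]
  split_ifs <;> rfl
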